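-- pv_equiv track=rewrite | github.com/versoindustries/HighNoonLLM | batch_train.py | preprocess_daily_dialog
-- ===== SOURCE A (Python) =====
-- from typing import Dict, Generator, List, Optional, Tuple, Any
--
-- def preprocess_daily_dialog(dataset) -> Generator[Dict[str, str], None, None]:
--     for item in dataset:
--         dialogue = item.get("dialog", [])
--         if not dialogue or len(dialogue) < 2:
--             continue
--         for t in range(len(dialogue) - 1):
--             context = " ".join(dialogue[:t + 1]).strip()
--             target = dialogue[t + 1].strip()
--             if context and target:
--                 yield {"context": context, "target": target, "task": "chat"}
-- ===== SOURCE B (Python) =====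
-- def preprocess_daily_dialog(dataset):
--     for item in dataset:
--         dialogue = item.get("dialog", [])
--         if len(dialogue) < 2:
--             continue
--         joined = dialogue[0]
--         for utterance in dialogue[1:]:
--             context = joined.strip()
--             target = utterance.strip()
--             if context and target:
--                 yield {"context": context, "target": target, "task": "chat"}
--             joined += " " + utterance
-- ===== Notes on version B (the rewrite author's own statement) =====
-- stated objective: alternative
-- what changed: B replaces the per-step re-join of every dialogue prefix (dialogue[:t+1] slice + ' '.join) with a single pass over the dialogue that maintains the running concatenated context incrementally.
import Mathlib
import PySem

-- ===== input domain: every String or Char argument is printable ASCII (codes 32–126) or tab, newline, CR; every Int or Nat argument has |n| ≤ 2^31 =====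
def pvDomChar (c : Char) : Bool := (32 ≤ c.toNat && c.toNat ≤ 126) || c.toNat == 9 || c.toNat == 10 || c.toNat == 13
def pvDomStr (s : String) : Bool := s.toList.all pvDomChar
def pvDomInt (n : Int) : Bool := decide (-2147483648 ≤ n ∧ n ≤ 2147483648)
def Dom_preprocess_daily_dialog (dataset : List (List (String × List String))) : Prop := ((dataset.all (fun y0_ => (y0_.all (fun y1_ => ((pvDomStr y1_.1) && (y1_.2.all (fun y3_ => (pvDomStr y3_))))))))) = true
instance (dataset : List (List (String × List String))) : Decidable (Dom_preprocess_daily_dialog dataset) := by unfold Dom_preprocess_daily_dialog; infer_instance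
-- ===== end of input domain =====

-- B replaces the per-step slice + " ".join of every dialogue prefix with one pass that
-- extends the running concatenated context incrementally; same return value (no speed claim).


-- ===== PORT A =====
def preprocess_daily_dialog (dataset : List (List (String × List String))) : List (List (String × String)) :=
  dataset.foldl (fun acc item =>
    let dialogue := PySem.Dict.getD (PySem.Dict.mk item) "dialog" []
    if dialogue = [] ∨ dialogue.length < 2 then acc
    else
      (PySem.List.pyRange 0 ((dialogue.length : Int) - 1) 1).foldl (fun acc2 t =>
        let context := PySem.Str.strip (PySem.Str.join " " (PySem.List.slice dialogue none (some (t + 1))))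
        -- dialogue[t+1]: t+1 is always in range here, so pyGetD's default is never used
        let target := PySem.Str.strip (PySem.List.pyGetD dialogue (t + 1) "")
        if context ≠ "" ∧ target ≠ "" then
          acc2 ++ [[("context", context), ("target", target), ("task", "chat")]]
        else acc2) acc) []

-- ===== PORT B =====
-- the inner 'for utterance in dialogue[1:]' loop of Source B, carrying the running 'joined' context
def pddPairs (joined : String) : List String → List (List (String × String))
  | [] => []
  | utterance :: rest =>
    let context := PySem.Str.strip joined
    let target := PySem.Str.strip utterance
    (if context ≠ "" ∧ target ≠ "" then
      [[("context", context), ("target", target), ("task", "chat")]]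
    else []) ++ pddPairs (joined ++ " " ++ utterance) rest

def preprocess_daily_dialog_alt (dataset : List (List (String × List String))) : List (List (String × String)) :=
  dataset.foldl (fun acc item =>
    let dialogue := PySem.Dict.getD (PySem.Dict.mk item) "dialog" []
    if dialogue.length < 2 then acc
    -- dialogue[0] via pyGetD (always in range here: length ≥ 2), dialogue[1:] via slice
    else acc ++ pddPairs (PySem.List.pyGetD dialogue 0 "") (PySem.List.slice dialogue (some 1) none)) []

-- ===== PRECONDITION & SPEC =====
def Spec_preprocess_daily_dialog (dataset : List (List (String × List String))) (out : List (List (String × String))) : Prop := out = preprocess_daily_dialog_alt dataset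
instance (dataset : List (List (String × List String))) (out : List (List (String × String))) : Decidable (Spec_preprocess_daily_dialog dataset out) := by unfold Spec_preprocess_daily_dialog; infer_instance

-- ===== CLAIM (what is proved, stated in full; the proofs are below) =====
def Claim_equal_preprocess_daily_dialog : Prop := ∀ (dataset : List (List (String × List String))), Dom_preprocess_daily_dialog dataset → Spec_preprocess_daily_dialog dataset (preprocess_daily_dialog dataset)

-- ===== LEMMAS AND PROOFS =====

-- the 'yield' of one (context, target) pair, and A's loop body reindexed to s = t + 1
def pddEmit (context target : String) : List (List (String × String)) :=
  if context ≠ "" ∧ target ≠ "" then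
    [[("context", context), ("target", target), ("task", "chat")]]
  else []

def pddAstep (d : List String) (acc2 : List (List (String × String))) (s : Int) :
    List (List (String × String)) :=
  acc2 ++ pddEmit (PySem.Str.strip (PySem.Str.join " " (PySem.List.slice d none (some s))))
              (PySem.Str.strip (PySem.List.pyGetD d s ""))

theorem pddPairs_cons (joined u : String) (rest : List String) :
    pddPairs joined (u :: rest)
      = pddEmit (PySem.Str.strip joined) (PySem.Str.strip u)
        ++ pddPairs (joined ++ " " ++ u) rest := rfl

theorem chars_join_append (sep u : List Char) : ∀ (l : List (List Char)) (p : List Char),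
    PySem.Chars.join sep ((p :: l) ++ [u]) = PySem.Chars.join sep (p :: l) ++ sep ++ u := by
  intro l
  induction l with
  | nil => intro p; simp [PySem.Chars.join_cons_cons, PySem.Chars.join_singleton]
  | cons q t ih =>
    intro p
    rw [List.cons_append, List.cons_append, PySem.Chars.join_cons_cons, ← List.cons_append,
      ih q, PySem.Chars.join_cons_cons]
    simp [List.append_assoc]

theorem pdd_join_append_singleton (pref : List String) (u : String) (h : pref ≠ []) :
    PySem.Str.join " " (pref ++ [u]) = PySem.Str.join " " pref ++ " " ++ u := by
  apply String.toList_inj.mp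
  cases pref with
  | nil => simp at h
  | cons a t =>
    simp only [PySem.Str.toList_join, String.toList_append, List.map_append, List.map_cons,
      List.map_nil, PySem.Str.toList_join]
    exact chars_join_append _ _ _ _

theorem pdd_join_singleton (h : String) : PySem.Str.join " " [h] = h := by
  apply String.toList_inj.mp
  simp [PySem.Str.toList_join, PySem.Chars.join_singleton]

-- A's inner loop over s = t + 1 with the already-joined prefix made explicit equals
-- B's single pass carrying the running joined context.
theorem pdd_core (rest : List String) : ∀ (pref : List String), pref ≠ [] →
    ∀ (acc : List (List (String × String))),
    (PySem.List.pyRange (pref.length : Int) ((pref.length : Int) + (rest.length : Int)) 1).foldl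
      (pddAstep (pref ++ rest)) acc
    = acc ++ pddPairs (PySem.Str.join " " pref) rest := by
  induction rest with
  | nil =>
    intro pref _ acc
    rw [show ((pref.length : Int) + (([] : List String).length : Int)) = (pref.length : Int) by simp,
      PySem.List.pyRange_one_eq_nil (le_refl _)]
    simp [pddPairs]
  | cons u rest' ih =>
    intro pref hpref acc
    rw [PySem.List.pyRange_one_cons (by push_cast [List.length_cons]; omega), List.foldl_cons]
    have hstep : pddAstep (pref ++ u :: rest') acc (pref.length : Int)
        = acc ++ pddEmit (PySem.Str.strip (PySem.Str.join " " pref)) (PySem.Str.strip u) := by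
      have hslice : PySem.List.slice (pref ++ u :: rest') none (some (pref.length : Int)) = pref := by
        rw [PySem.List.slice_to_natCast]
        simp
      have hget : PySem.List.pyGetD (pref ++ u :: rest') (pref.length : Int) "" = u := by
        rw [PySem.List.pyGetD_natCast]
        simp [List.getD]
      rw [pddAstep, hslice, hget]
    rw [hstep]
    have h1 : ((pref.length : Int) + 1) = (((pref ++ [u]).length : Nat) : Int) := by
      simp
    have h2 : ((pref.length : Int) + ((u :: rest').length : Int))
        = ((((pref ++ [u]).length : Nat) : Int) + ((rest'.length : Nat) : Int)) := by
      simp; omega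
    have h3 : pref ++ u :: rest' = (pref ++ [u]) ++ rest' := by simp
    rw [h1, h2, h3, ih (pref ++ [u]) (by simp)]
    rw [pdd_join_append_singleton pref u hpref, pddPairs_cons, List.append_assoc]

-- reindexing A's loop counter t ∈ range(0, b-1) to s = t + 1 ∈ range(1, b)
theorem pdd_shift (φ : List (List (String × String)) → Int → List (List (String × String)))
    (b : Int) (init : List (List (String × String))) :
    (PySem.List.pyRange 0 (b - 1) 1).foldl (fun a t => φ a (t + 1)) init
      = (PySem.List.pyRange 1 b 1).foldl φ init := by
  rw [PySem.List.pyRange_one 0 (b - 1), PySem.List.pyRange_one 1 b]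
  rw [show b - 1 - 0 = b - 1 by ring]
  rw [List.foldl_map, List.foldl_map]
  congr 1
  funext a k
  congr 1
  omega

-- A's literal loop body is pddAstep at s = t + 1
theorem pdd_bodyA (d : List String) :
    (fun (acc2 : List (List (String × String))) (t : Int) =>
      let context := PySem.Str.strip (PySem.Str.join " " (PySem.List.slice d none (some (t + 1))))
      let target := PySem.Str.strip (PySem.List.pyGetD d (t + 1) "")
      if context ≠ "" ∧ target ≠ "" then
        acc2 ++ [[("context", context), ("target", target), ("task", "chat")]]
      else acc2)
    = (fun acc2 t => pddAstep d acc2 (t + 1)) := by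
  funext acc2 t
  simp only [pddAstep, pddEmit]
  split_ifs <;> simp

-- pdd_core specialized to the one-element prefix [dialogue[0]]
theorem pdd_core1 (h : String) (rest : List String) (acc : List (List (String × String))) :
    (PySem.List.pyRange 1 (1 + (rest.length : Int)) 1).foldl (pddAstep (h :: rest)) acc
      = acc ++ pddPairs h rest := by
  have hc := pdd_core rest [h] (by simp) acc
  simpa [pdd_join_singleton] using hc

-- ===== VERDICT (by name: the statement is the Claim_ definition above) =====
theorem preprocess_daily_dialog_spec : Claim_equal_preprocess_daily_dialog := by
  intro dataset _
  unfold Spec_preprocess_daily_dialog preprocess_daily_dialog preprocess_daily_dialog_alt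
  congr 1
  funext acc item
  simp only [pdd_bodyA]
  by_cases hlen : (PySem.Dict.getD (PySem.Dict.mk item) "dialog" []).length < 2
  · rw [if_pos (Or.inr hlen), if_pos hlen]
  · have hne : ¬(PySem.Dict.getD (PySem.Dict.mk item) "dialog" [] = []
        ∨ (PySem.Dict.getD (PySem.Dict.mk item) "dialog" []).length < 2) := by
      intro hc
      rcases hc with hc | hc
      · exact hlen (by simp [hc])
      · exact hlen hc
    rw [if_neg hne, if_neg hlen]
    cases hd : PySem.Dict.getD (PySem.Dict.mk item) "dialog" [] with
    | nil => exact absurd (Or.inl hd) hne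
    | cons h rest =>
      rw [pdd_shift (pddAstep (h :: rest)) ((h :: rest).length : Int) acc]
      rw [show (((h :: rest).length : Nat) : Int) = 1 + ((rest.length : Nat) : Int) by
        push_cast [List.length_cons]; omega]
      rw [pdd_core1 h rest acc]
      rw [PySem.List.slice_from_one]
      simp [PySem.List.pyGetD_ofNat']
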